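-- pv_equiv track=rewrite | github.com/daniel-reich/turbo-robot | SHdu4GwBQehhDm4xT_11.py | freed_prisoners
-- ===== SOURCE A (Python) =====
-- def freed_prisoners(prison):
--   counter = 0
--   if(prison[0] == 0):
--     return 0
--   for cell in prison:
--     if(cell == 1):
--       counter += 1
--       for num in range(0, len(prison)):
--         if(prison[num] == 0):
--           prison[num] = 1
--         elif(prison[num] == 1):
--           prison[num] = 0
--   return counter
-- ===== SOURCE B (Python) =====
-- def freed_prisoners(prison):
--     if prison[0] == 0:
--         return 0
--     count = 0
--     flipped = False
--     for v in prison: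
--         if v == (0 if flipped else 1):
--             count += 1
--             flipped = not flipped
--     return count
-- ===== Notes on version B (the rewrite author's own statement) =====
-- stated objective: simpler
-- what changed: Instead of rewriting every cell of the list on each freed prisoner (nested loop with in-place mutation), B tracks a single flip-parity bit and reads each original cell once; A's in-place mutation of the argument is not reproduced (return-value equivalence only).
-- outside the precondition, e.g. on freed_prisoners([]): A raises IndexError, B raises IndexError
import Mathlib
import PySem

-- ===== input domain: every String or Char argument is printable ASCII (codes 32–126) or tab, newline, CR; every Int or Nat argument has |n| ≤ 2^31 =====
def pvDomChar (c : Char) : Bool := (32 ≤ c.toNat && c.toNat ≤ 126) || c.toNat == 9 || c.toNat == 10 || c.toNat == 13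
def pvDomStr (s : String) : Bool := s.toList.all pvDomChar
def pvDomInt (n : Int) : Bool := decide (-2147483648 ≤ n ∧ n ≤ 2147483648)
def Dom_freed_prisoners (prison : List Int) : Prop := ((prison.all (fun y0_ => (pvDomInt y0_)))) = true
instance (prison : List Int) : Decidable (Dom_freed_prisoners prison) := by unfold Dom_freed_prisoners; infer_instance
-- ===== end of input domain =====

-- B tracks a flip-parity bit in one pass instead of A's rewriting the whole list on each freed prisoner;
-- A mutates its argument in place, B does not: the equivalence proved is about the RETURN value only.

-- ===== PORT A =====
-- the inner 'for num in range(0, len(prison)): flip 0<->1' pass of A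
def pvFlip (p : List Int) : List Int :=
  p.map (fun x => if x = 0 then 1 else if x = 1 then 0 else x)

theorem pvFlip_length (p : List Int) : (pvFlip p).length = p.length := by
  simp [pvFlip]

-- A's outer 'for cell in prison' loop: Python iterates by index over the list it is mutating
def pvALoop (p : List Int) (i : Nat) (c : Int) : Int :=
  if h : i < p.length then
    if p[i] = 1 then pvALoop (pvFlip p) (i + 1) (c + 1)
    else pvALoop p (i + 1) c
  else c
termination_by p.length - i
decreasing_by
  · rw [pvFlip_length]; omega
  · omega

def freed_prisoners (prison : List Int) : Int :=
  match prison with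
  | [] => 0          -- Python raises IndexError indexing the first element; excluded by Pre_
  | h :: _ => if h = 0 then 0 else pvALoop prison 0 0

-- ===== PORT B =====
-- one step of B's loop: state = (count, flipped)
def pvStep (s : Int × Bool) (v : Int) : Int × Bool :=
  if v = (if s.2 then 0 else 1) then (s.1 + 1, !s.2) else s

def freed_prisoners_alt (prison : List Int) : Int :=
  match prison with
  | [] => 0          -- indexing the first element raises in Python too; excluded by Pre_
  | h :: _ => if h = 0 then 0 else (prison.foldl pvStep (0, false)).1

-- ===== PRECONDITION & SPEC =====
-- Pre_ excludes only the empty list, on which A (and B) raise IndexError at prison[0]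
def Pre_freed_prisoners (prison : List Int) : Prop := prison ≠ []
instance (prison : List Int) : Decidable (Pre_freed_prisoners prison) := by
  unfold Pre_freed_prisoners; infer_instance

def pvWitness_freed_prisoners : List Int := [1, 0, 1, 0]

def Spec_freed_prisoners (prison : List Int) (out : Int) : Prop := out = freed_prisoners_alt prison
instance (prison : List Int) (out : Int) : Decidable (Spec_freed_prisoners prison out) := by
  unfold Spec_freed_prisoners; infer_instance

-- ===== CLAIM (what is proved, stated in full; the proofs are below) =====
def Claim_equal_freed_prisoners : Prop := ∀ (prison : List Int), Dom_freed_prisoners prison → Pre_freed_prisoners prison → Spec_freed_prisoners prison (freed_prisoners prison)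

-- ===== LEMMAS AND PROOFS =====

-- A's outer loop rewritten on the suffix still to be visited
def pvARec : List Int → Int → Int
  | [], c => c
  | x :: xs, c => if x = 1 then pvARec (pvFlip xs) (c + 1) else pvARec xs c
termination_by xs => xs.length
decreasing_by
  · simp [pvFlip_length]
  · simp

theorem pvFlip_drop (p : List Int) (i : Nat) : (pvFlip p).drop i = pvFlip (p.drop i) := by
  simp [pvFlip, List.map_drop]

theorem pvFlip_flip (p : List Int) : pvFlip (pvFlip p) = p := by
  induction p with
  | nil => rfl
  | cons x xs ih =>
      simp only [pvFlip, List.map_cons, List.cons.injEq] at *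
      refine ⟨?_, ih⟩
      by_cases h0 : x = 0 <;> by_cases h1 : x = 1 <;> simp [h0, h1]

theorem pvALoop_eq_rec (n : Nat) : ∀ (p : List Int) (i : Nat) (c : Int),
    p.length - i = n → pvALoop p i c = pvARec (p.drop i) c := by
  induction n with
  | zero =>
      intro p i c h
      rw [pvALoop]
      have hge : ¬ i < p.length := by omega
      simp [hge, List.drop_eq_nil_of_le (by omega : p.length ≤ i), pvARec]
  | succ n ih =>
      intro p i c h
      have hi : i < p.length := by omega
      rw [pvALoop]
      have hdrop : p.drop i = p[i] :: p.drop (i + 1) := List.drop_eq_getElem_cons hi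
      rw [hdrop]
      simp only [hi, dif_pos]
      by_cases h1 : p[i] = 1
      · rw [if_pos h1]
        rw [ih (pvFlip p) (i + 1) (c + 1) (by rw [pvFlip_length]; omega)]
        rw [pvFlip_drop]
        simp [pvARec, h1]
      · rw [if_neg h1]
        rw [ih p (i + 1) c (by omega)]
        simp only [pvARec]
        rw [if_neg h1]

-- the flipped-suffix representation: applying pvFlip when b is true
def pvFlipIf (b : Bool) (p : List Int) : List Int := if b then pvFlip p else p

theorem pvARec_eq_fold : ∀ (xs : List Int) (c : Int) (b : Bool),
    pvARec (pvFlipIf b xs) c = (xs.foldl pvStep (c, b)).1 := by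
  intro xs
  induction xs with
  | nil => intro c b; cases b <;> simp [pvFlipIf, pvFlip, pvARec]
  | cons x xs ih =>
      intro c b
      have hcons : pvFlipIf b (x :: xs)
          = (if b then (if x = 0 then 1 else if x = 1 then 0 else x) else x) :: pvFlipIf b xs := by
        cases b <;> simp [pvFlipIf, pvFlip]
      rw [hcons]
      have hcond : ((if b then (if x = 0 then 1 else if x = 1 then 0 else x) else x) = 1)
          ↔ (x = (if b then 0 else 1)) := by
        cases b <;> by_cases h0 : x = 0 <;> by_cases h1 : x = 1 <;> simp_all
      by_cases hx : x = (if b then 0 else 1)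
      · have : (if b then (if x = 0 then 1 else if x = 1 then 0 else x) else x) = 1 := hcond.mpr hx
        simp only [pvARec]; rw [if_pos this]
        have hflip : pvFlip (pvFlipIf b xs) = pvFlipIf (!b) xs := by
          cases b <;> simp [pvFlipIf, pvFlip_flip]
        rw [hflip, ih (c + 1) (!b)]
        simp [List.foldl_cons, pvStep, hx]
      · have : ¬ (if b then (if x = 0 then 1 else if x = 1 then 0 else x) else x) = 1 := by
          rw [hcond]; exact hx
        simp only [pvARec]; rw [if_neg this, ih c b]
        simp [List.foldl_cons, pvStep, hx]

-- ===== VERDICT (by name: the statement is the Claim_ definition above) =====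
theorem freed_prisoners_spec : Claim_equal_freed_prisoners := by
  intro prison _ hpre
  unfold Spec_freed_prisoners
  match prison with
  | [] => exact absurd rfl hpre
  | h :: t =>
      simp only [freed_prisoners, freed_prisoners_alt]
      by_cases h0 : h = 0
      · simp [h0]
      · rw [if_neg h0, if_neg h0]
        rw [pvALoop_eq_rec ((h :: t).length - 0) (h :: t) 0 0 rfl]
        simpa [pvFlipIf] using pvARec_eq_fold (h :: t) 0 false
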